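-- pv_equiv track=rewrite | github.com/knoop7/ha_laohuangli | custom_components/tgtg/moon.py | _get_moon_phase_luck
-- ===== SOURCE A (Python) =====
-- def _get_moon_phase_luck(d):
--     luck_days = {
--         '大吉': [1, 3, 8, 11, 15, 16, 23, 28],
--         '吉': [2, 7, 13, 18, 22, 27, 29, 30],
--         '平': [5, 9, 10, 14, 20, 24, 25],
--         '凶': [4, 6, 12, 17, 19, 21, 26]
--     }
--
--     day = int(d)
--     for luck, days in luck_days.items():
--         if day in days:
--             return luck
--     return '平吉'
-- ===== SOURCE B (Python) =====
-- _LUCK_BY_DAY = {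
--     1: '大吉', 3: '大吉', 8: '大吉', 11: '大吉', 15: '大吉', 16: '大吉', 23: '大吉', 28: '大吉',
--     2: '吉', 7: '吉', 13: '吉', 18: '吉', 22: '吉', 27: '吉', 29: '吉', 30: '吉',
--     5: '平', 9: '平', 10: '平', 14: '平', 20: '平', 24: '平', 25: '平',
--     4: '凶', 6: '凶', 12: '凶', 17: '凶', 19: '凶', 21: '凶', 26: '凶',
-- }
--
-- def _get_moon_phase_luck(d):
--     return _LUCK_BY_DAY.get(int(d), '平吉')
-- ===== Notes on version B (the rewrite author's own statement) =====
-- stated objective: simpler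
-- what changed: Replaces the scan over four category lists (a loop with an inner membership test) by one flat day-to-luck dict built once at module level, so the function body is a single .get with default and no loop at all.
import Mathlib
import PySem

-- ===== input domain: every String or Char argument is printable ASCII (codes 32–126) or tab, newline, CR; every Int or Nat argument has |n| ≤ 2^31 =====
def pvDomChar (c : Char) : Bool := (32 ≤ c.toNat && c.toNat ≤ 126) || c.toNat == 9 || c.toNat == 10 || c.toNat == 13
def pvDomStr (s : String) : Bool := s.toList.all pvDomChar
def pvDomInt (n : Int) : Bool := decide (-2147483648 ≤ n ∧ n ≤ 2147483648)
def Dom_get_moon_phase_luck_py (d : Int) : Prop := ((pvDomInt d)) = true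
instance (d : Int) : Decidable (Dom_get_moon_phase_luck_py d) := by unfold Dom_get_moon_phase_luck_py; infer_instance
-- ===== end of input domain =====

-- B replaces A's loop over four (luck, day-list) pairs by one flat day→luck map with a default lookup (objective: simpler).

-- ===== PORT A =====
-- the dict literal luck_days, in insertion order
def pvLuckDays : List (String × List Int) :=
  [("大吉", [1, 3, 8, 11, 15, 16, 23, 28]),
   ("吉",   [2, 7, 13, 18, 22, 27, 29, 30]),
   ("平",   [5, 9, 10, 14, 20, 24, 25]),
   ("凶",   [4, 6, 12, 17, 19, 21, 26])]

-- the for-loop: first pair whose day list contains day wins, else the fall-through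
def pvLuckLoop (day : Int) : List (String × List Int) → String
  | [] => "平吉"
  | (luck, days) :: rest => if days.contains day then luck else pvLuckLoop day rest

def get_moon_phase_luck_py (d : Int) : String :=
  pvLuckLoop d pvLuckDays   -- int(d) on an int is the identity

-- ===== PORT B =====
-- the flat module-level dict _LUCK_BY_DAY, in insertion order
def pvLuckByDay : PySem.Dict Int String := PySem.Dict.mk
  [(1, "大吉"), (3, "大吉"), (8, "大吉"), (11, "大吉"), (15, "大吉"), (16, "大吉"), (23, "大吉"), (28, "大吉"),
   (2, "吉"), (7, "吉"), (13, "吉"), (18, "吉"), (22, "吉"), (27, "吉"), (29, "吉"), (30, "吉"),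
   (5, "平"), (9, "平"), (10, "平"), (14, "平"), (20, "平"), (24, "平"), (25, "平"),
   (4, "凶"), (6, "凶"), (12, "凶"), (17, "凶"), (19, "凶"), (21, "凶"), (26, "凶")]

def get_moon_phase_luck_py_alt (d : Int) : String :=
  PySem.Dict.getD pvLuckByDay d "平吉"

-- ===== PRECONDITION & SPEC =====
def Spec_get_moon_phase_luck_py (d : Int) (out : String) : Prop := out = get_moon_phase_luck_py_alt d
instance (d : Int) (out : String) : Decidable (Spec_get_moon_phase_luck_py d out) := by unfold Spec_get_moon_phase_luck_py; infer_instance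

-- ===== CLAIM (what is proved, stated in full; the proofs are below) =====
def Claim_equal_get_moon_phase_luck_py : Prop := ∀ (d : Int), Dom_get_moon_phase_luck_py d → Spec_get_moon_phase_luck_py d (get_moon_phase_luck_py d)

-- ===== LEMMAS AND PROOFS =====

-- outside 1..30 both programs fall through to the default
set_option maxHeartbeats 2000000 in
theorem pv_out_of_range (d : Int) (h : ¬(1 ≤ d ∧ d ≤ 30)) :
    get_moon_phase_luck_py d = "平吉" ∧ get_moon_phase_luck_py_alt d = "平吉" := by
  constructor
  · simp only [get_moon_phase_luck_py, pvLuckDays, pvLuckLoop, List.contains_eq_mem,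
      List.mem_cons, List.not_mem_nil, or_false, decide_eq_true_eq]
    split_ifs with h1 h2 h3 h4 <;> first | rfl | omega
  · show pvLuckByDay.getD d "平吉" = "平吉"
    have hc : pvLuckByDay.contains d = false := by
      rw [PySem.Dict.contains_eq_decide_mem_keys]
      simp only [pvLuckByDay, PySem.Dict.keys_mk, List.map_cons, List.map_nil,
        decide_eq_false_iff_not, List.mem_cons, List.not_mem_nil, or_false]
      omega
    exact PySem.Dict.getD_of_not_contains _ _ hc

-- ===== VERDICT (by name: the statement is the Claim_ definition above) =====
theorem get_moon_phase_luck_py_spec : Claim_equal_get_moon_phase_luck_py := by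
  intro d _
  unfold Spec_get_moon_phase_luck_py
  by_cases h : 1 ≤ d ∧ d ≤ 30
  · obtain ⟨h1, h2⟩ := h
    interval_cases d <;> decide
  · obtain ⟨ha, hb⟩ := pv_out_of_range d h
    rw [ha, hb]
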